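-- pv_equiv track=rewrite | github.com/a9lim/kenoma | kenoma.py | safe_flush_point
-- ===== SOURCE A (Python) =====
-- HOLDBACK_LINE_BUDGET_FLOOR = 200  # floor for the dynamic holdback budget
--
-- def line_budget_for(prompt: str) -> int:
--     """Holdback budget in chars, derived from the current prompt length.
--     A constant cap (#3) leaks the in-progress line for fancy powerline
--     prompts; doubling the prompt length absorbs cwd drift growth, with a
--     floor for short prompts."""
--     return max(HOLDBACK_LINE_BUDGET_FLOOR, 2 * len(prompt))
--
-- def safe_flush_point(produced: str, current_prompt: str, last_nl_hint: int = -1) -> int: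
--     """Index up to which `produced` can be flushed to stdout without risking
--     that the held-back portion turns into a prompt match on the next token.
--
--     `last_nl_hint` is the caller-known absolute position of the latest \\n in
--     `produced`, or -1 if unknown. With the hint we skip a full rfind on the
--     growing buffer each chunk; without it we fall back to scanning."""
--     n = len(produced)
--     budget = line_budget_for(current_prompt)
--     # Regex holdback: the latest \n could still anchor a skeleton match if
--     # the chars since it are all non-newline and within the line budget.
--     regex_safe = n
--     last_nl = last_nl_hint if last_nl_hint >= 0 else produced.rfind("\n")
--     if last_nl >= 0:
--         tail = produced[last_nl + 1:]
--         if "\n" not in tail and len(tail) <= budget: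
--             regex_safe = last_nl
--     # Exact holdback: longest suffix of produced that's a prefix of the
--     # current prompt — those chars might complete into a verbatim repro.
--     # Subsumed by the regex holdback in most cases, but cheap insurance.
--     exact_safe = n
--     stop_str = current_prompt.rstrip() or current_prompt
--     for k in range(min(len(stop_str), n), 0, -1):
--         if produced.endswith(stop_str[:k]):
--             exact_safe = n - k
--             break
--     return min(regex_safe, exact_safe)
-- ===== SOURCE B (Python) =====
-- def safe_flush_point(produced: str, current_prompt: str, last_nl_hint: int = -1) -> int:
--     """Same result as A, but the exact-holdback suffix/prefix overlap is found
--     with a KMP prefix-function automaton (O(len(stop)+len(produced)) always)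
--     instead of A's decreasing-k endswith scan (quadratic in the worst case,
--     though it exits early on typical inputs)."""
--     n = len(produced)
--     budget = max(200, 2 * len(current_prompt))
--     nl = last_nl_hint if last_nl_hint >= 0 else produced.rfind("\n")
--     regex_safe = nl if (nl >= 0 and "\n" not in produced[nl + 1:]
--                         and n - (nl + 1) <= budget) else n
--     stop = current_prompt.rstrip() or current_prompt
--     m = len(stop)
--     k = 0
--     if m:
--         # prefix function of `stop`
--         fail = [0]
--         for i in range(1, m):
--             j = fail[i - 1]
--             while j and stop[j] != stop[i]:
--                 j = fail[j - 1]
--             fail.append(j + 1 if stop[j] == stop[i] else 0)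
--         # run the automaton over `produced`; final state = longest prefix of
--         # `stop` that is a suffix of `produced`
--         for c in produced:
--             if k == m:
--                 k = fail[m - 1]
--             while k and stop[k] != c:
--                 k = fail[k - 1]
--             k = k + 1 if stop[k] == c else 0
--     return min(regex_safe, n - k)
-- ===== Notes on version B (the rewrite author's own statement) =====
-- stated objective: faster
-- what changed: The longest produced-suffix/prompt-prefix overlap is computed by a KMP prefix-function automaton run once over produced instead of A's decreasing-k loop that calls endswith on every candidate prefix length, removing the quadratic worst case.
import Mathlib
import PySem

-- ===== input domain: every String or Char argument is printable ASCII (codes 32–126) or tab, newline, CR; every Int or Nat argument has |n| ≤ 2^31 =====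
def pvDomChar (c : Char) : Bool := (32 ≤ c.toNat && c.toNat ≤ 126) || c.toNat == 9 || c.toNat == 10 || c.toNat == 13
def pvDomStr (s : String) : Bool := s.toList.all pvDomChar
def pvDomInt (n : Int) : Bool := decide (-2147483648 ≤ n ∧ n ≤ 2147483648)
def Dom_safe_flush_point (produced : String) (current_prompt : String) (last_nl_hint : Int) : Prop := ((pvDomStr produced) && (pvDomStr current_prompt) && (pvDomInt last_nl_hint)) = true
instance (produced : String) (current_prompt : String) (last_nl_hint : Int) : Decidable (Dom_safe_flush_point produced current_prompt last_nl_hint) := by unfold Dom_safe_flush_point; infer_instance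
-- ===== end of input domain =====

-- B replaces A's worst-case-quadratic decreasing-k endswith scan for the
-- longest produced-suffix/prompt-prefix overlap by a KMP prefix-function
-- automaton (objective: faster on overlap-heavy inputs).

-- ===== PORT A =====
-- the 'for k in range(min(len(stop_str), n), 0, -1)' loop with its break
def pvALoop (P : List Char) (n : Int) (stop : List Char) : List Int → Int
  | [] => n
  | k :: rest =>
    if PySem.Chars.endswith P (PySem.List.slice stop none (some k)) = true then n - k
    else pvALoop P n stop rest

def safe_flush_point (produced : String) (current_prompt : String) (last_nl_hint : Int) : Int :=
  let P := produced.toList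
  let n : Int := (P.length : Int)
  let budget : Int := max 200 (2 * (current_prompt.toList.length : Int))
  let last_nl : Int := if 0 ≤ last_nl_hint then last_nl_hint else PySem.Chars.rfind P ['\n']
  let regex_safe : Int :=
    if 0 ≤ last_nl then
      let tail := PySem.List.slice P (some (last_nl + 1)) none
      if PySem.Chars.isIn ['\n'] tail = false ∧ ((tail.length : Int)) ≤ budget then last_nl
      else n
    else n
  let r := PySem.Chars.rstrip current_prompt.toList
  let stop := if r = [] then current_prompt.toList else r
  let exact_safe := pvALoop P n stop (PySem.List.pyRange (min (stop.length : Int) n) 0 (-1))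
  min regex_safe exact_safe

-- ===== PORT B =====
-- the 'while j and stop[j] != c: j = fail[j-1]' fail-link descent; fuel = the
-- start value of j bounds the strictly decreasing j, so the fuel never runs out
def pvChain (p : List Char) (fail : List Nat) (c : Option Char) : Nat → Nat → Nat
  | 0, j => j
  | fuel + 1, j =>
    if j ≠ 0 ∧ p[j]? ≠ c then pvChain p fail c fuel (fail.getD (j - 1) 0) else j

-- the prefix-function construction loop ('fail = [0]; for i in range(1, m): … append')
def pvFailAux (p : List Char) : Nat → List Nat
  | 0 => []
  | i + 1 =>
    let fail := pvFailAux p i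
    if i = 0 then fail ++ [0]
    else
      let j0 := fail.getD (i - 1) 0
      let j := pvChain p fail p[i]? j0 j0
      fail ++ [if p[j]? = p[i]? then j + 1 else 0]

-- one automaton step for one char of `produced`
def pvStep (p : List Char) (fail : List Nat) (m : Nat) (k : Nat) (c : Char) : Nat :=
  let k1 := if k = m then fail.getD (m - 1) 0 else k
  let k2 := pvChain p fail (some c) k1 k1
  if p[k2]? = some c then k2 + 1 else 0

def safe_flush_point_alt (produced : String) (current_prompt : String) (last_nl_hint : Int) : Int :=
  let P := produced.toList
  let n : Int := (P.length : Int)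
  let budget : Int := max 200 (2 * (current_prompt.toList.length : Int))
  let nl : Int := if 0 ≤ last_nl_hint then last_nl_hint else PySem.Chars.rfind P ['\n']
  let regex_safe : Int :=
    if 0 ≤ nl ∧ PySem.Chars.isIn ['\n'] (PySem.List.slice P (some (nl + 1)) none) = false ∧
        n - (nl + 1) ≤ budget then nl
    else n
  let r := PySem.Chars.rstrip current_prompt.toList
  let stop := if r = [] then current_prompt.toList else r
  let m := stop.length
  let k : Nat := if m = 0 then 0 else
    let fail := pvFailAux stop m
    P.foldl (pvStep stop fail m) 0
  min regex_safe (n - (k : Int))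

-- ===== PRECONDITION & SPEC =====
def Spec_safe_flush_point (produced : String) (current_prompt : String) (last_nl_hint : Int) (out : Int) : Prop := out = safe_flush_point_alt produced current_prompt last_nl_hint
instance (produced : String) (current_prompt : String) (last_nl_hint : Int) (out : Int) : Decidable (Spec_safe_flush_point produced current_prompt last_nl_hint out) := by unfold Spec_safe_flush_point; infer_instance

-- ===== CLAIM (what is proved, stated in full; the proofs are below) =====
def Claim_equal_safe_flush_point : Prop := ∀ (produced : String) (current_prompt : String) (last_nl_hint : Int), Dom_safe_flush_point produced current_prompt last_nl_hint → Spec_safe_flush_point produced current_prompt last_nl_hint (safe_flush_point produced current_prompt last_nl_hint)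

-- ===== LEMMAS AND PROOFS =====

-- longest k ≤ min lengths with p.take k a suffix of t (the value both exact-holdback computations find)
def pvNSP (p t : List Char) : Nat :=
  Nat.findGreatest (fun k => p.take k <:+ t) (min p.length t.length)

-- longest proper border of p.take s (the prefix-function value fail[s-1])
def pvFB (p : List Char) (s : Nat) : Nat :=
  Nat.findGreatest (fun k => p.take k <:+ p.take s) (s - 1)

theorem pv_snoc_suffix_iff {α : Type} [DecidableEq α] (u t : List α) (a c : α) :
    (u ++ [a] <:+ t ++ [c]) ↔ (a = c ∧ u <:+ t) := by
  rw [← List.reverse_prefix, ← List.reverse_prefix (l₁ := u)]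
  simp [List.cons_prefix_cons]

theorem pv_take_ext (p t : List Char) (c : Char) (k : Nat) (hk : k < p.length) :
    (p.take (k + 1) <:+ t ++ [c]) ↔ (p.take k <:+ t ∧ p[k]? = some c) := by
  rw [List.take_add_one, List.getElem?_eq_getElem hk]
  simp only [Option.toList_some]
  rw [pv_snoc_suffix_iff]
  constructor
  · rintro ⟨h1, h2⟩; exact ⟨h2, by rw [h1]⟩
  · rintro ⟨h1, h2⟩; exact ⟨by injection h2, h1⟩

theorem pv_sfx_len (p t : List Char) (k : Nat) (hk : k ≤ p.length)
    (h : p.take k <:+ t) : k ≤ t.length := by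
  have := h.length_le
  simp [List.length_take] at this
  omega

theorem pv_border (p t : List Char) (k f : Nat) (hkf : k ≤ f) (hf : f ≤ p.length)
    (h1 : p.take k <:+ t) (h2 : p.take f <:+ t) : p.take k <:+ p.take f :=
  List.suffix_of_suffix_length_le h1 h2 (by simp [List.length_take]; omega)

theorem pvFB_le (p : List Char) (s : Nat) : pvFB p s ≤ s - 1 :=
  Nat.findGreatest_le _

theorem pvFB_sfx (p : List Char) (s : Nat) : p.take (pvFB p s) <:+ p.take s := by
  have h0 : p.take 0 <:+ p.take s := by simp
  exact Nat.findGreatest_spec (P := fun k => p.take k <:+ p.take s) (Nat.zero_le _) h0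

theorem pvFB_max (p : List Char) (s k : Nat) (hk : k ≤ s - 1)
    (h : p.take k <:+ p.take s) : k ≤ pvFB p s :=
  Nat.le_findGreatest hk h

-- the fail list is correct up to index `upto`
def pvFailSpec (p : List Char) (fail : List Nat) (upto : Nat) : Prop :=
  ∀ j, j < upto → fail.getD j 0 = pvFB p (j + 1)

theorem pvChain_spec (p : List Char) (fail : List Nat) (c : Option Char) (t : List Char) :
    ∀ (j : Nat) (fuel : Nat), j ≤ fuel → j < p.length → p.take j <:+ t →
    (∀ j', j' < j → fail.getD j' 0 = pvFB p (j' + 1)) →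
    (pvChain p fail c fuel j ≤ j ∧
     p.take (pvChain p fail c fuel j) <:+ t ∧
     (pvChain p fail c fuel j = 0 ∨ p[pvChain p fail c fuel j]? = c) ∧
     (∀ k, k ≤ j → p.take k <:+ t → p[k]? = c → k ≤ pvChain p fail c fuel j)) := by
  intro j
  induction j using Nat.strong_induction_on with
  | _ j IH =>
    intro fuel hfuel hj hsfx hfail
    match j, fuel with
    | 0, 0 =>
      refine ⟨by simp [pvChain], by simp [pvChain], Or.inl (by simp [pvChain]), ?_⟩
      intro k hk _ _
      have : pvChain p fail c 0 0 = 0 := by simp [pvChain]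
      omega
    | 0, fuel + 1 =>
      have hz : pvChain p fail c (fuel + 1) 0 = 0 := by simp [pvChain]
      refine ⟨by omega, by rw [hz]; simp, Or.inl hz, ?_⟩
      intro k hk _ _; omega
    | j + 1, 0 => omega
    | j + 1, fuel + 1 =>
      by_cases hc : p[j + 1]? = c
      · -- loop exits at j+1
        have hz : pvChain p fail c (fuel + 1) (j + 1) = j + 1 := by simp [pvChain, hc]
        rw [hz]
        exact ⟨le_refl _, hsfx, Or.inr hc, fun k hk _ _ => hk⟩
      · -- descend the fail link
        have hstep : pvChain p fail c (fuel + 1) (j + 1)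
            = pvChain p fail c fuel (fail.getD j 0) := by
          simp [pvChain, hc]
        have hgd : fail.getD j 0 = pvFB p (j + 1) := hfail j (Nat.lt_succ_self _)
        have hfb_le : pvFB p (j + 1) ≤ j := by have := pvFB_le p (j + 1); omega
        have hfb_sfx : p.take (pvFB p (j + 1)) <:+ t :=
          (pvFB_sfx p (j + 1)).trans hsfx
        have hrec := IH (pvFB p (j + 1)) (by omega) fuel (by omega) (by omega) hfb_sfx
          (fun j' hj' => hfail j' (by omega))
        rw [hstep, hgd]
        refine ⟨by omega, hrec.2.1, hrec.2.2.1, ?_⟩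
        intro k hk hksfx hkc
        have hkne : k ≠ j + 1 := by intro h; rw [h] at hkc; exact hc hkc
        have hkb : p.take k <:+ p.take (j + 1) :=
          pv_border p t k (j + 1) (by omega) (by omega) hksfx hsfx
        have : k ≤ pvFB p (j + 1) := pvFB_max p (j + 1) k (by omega) hkb
        exact hrec.2.2.2 k this hksfx hkc

theorem pvStep_eq (p : List Char) (fail : List Nat) (hp : p ≠ [])
    (hfail : pvFailSpec p fail p.length) (t : List Char) (c : Char) :
    pvStep p fail p.length (pvNSP p t) c = pvNSP p (t ++ [c]) := by
  have hm : 0 < p.length := List.length_pos_iff.mpr hp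
  set m := p.length with hmdef
  set s := pvNSP p t with hsdef
  have hs_le : s ≤ min m t.length := Nat.findGreatest_le _
  have hs_sfx : p.take s <:+ t := by
    have h0 : p.take 0 <:+ t := by simp
    exact Nat.findGreatest_spec (P := fun k => p.take k <:+ t) (Nat.zero_le _) h0
  have hs_max : ∀ k, k ≤ min m t.length → p.take k <:+ t → k ≤ s :=
    fun k hk h => Nat.le_findGreatest hk h
  -- j0 = state after the 'if k == m' reset
  set j0 := if s = m then fail.getD (m - 1) 0 else s with hj0def
  have hgd : fail.getD (m - 1) 0 = pvFB p m := by
    have := hfail (m - 1) (by omega)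
    rwa [Nat.sub_add_cancel hm] at this
  have hj0_lt : j0 < m := by
    rw [hj0def]; split
    · rw [hgd]; have := pvFB_le p m; omega
    · omega
  have hj0_sfx : p.take j0 <:+ t := by
    rw [hj0def]; split
    · rename_i hsm
      rw [hgd]
      have h1 : p.take (pvFB p m) <:+ p.take m := pvFB_sfx p m
      rw [List.take_of_length_le (le_refl m)] at h1
      have h2 : p <:+ t := by
        have := hs_sfx; rw [hsm, List.take_of_length_le (le_refl m)] at this
        exact this
      exact h1.trans h2
    · exact hs_sfx
  have hj0_max : ∀ k, k < m → p.take k <:+ t → k ≤ j0 := by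
    intro k hk hksfx
    have hkt : k ≤ t.length := pv_sfx_len p t k (by omega) hksfx
    have hks : k ≤ s := hs_max k (by omega) hksfx
    rw [hj0def]; split
    · rename_i hsm
      rw [hgd]
      have hpt : p <:+ t := by
        have := hs_sfx; rw [hsm, List.take_of_length_le (le_refl m)] at this
        exact this
      have hkb : p.take k <:+ p.take m :=
        pv_border p t k m (by omega) (le_refl m) hksfx
          (by rw [List.take_of_length_le (le_refl m)]; exact hpt)
      exact pvFB_max p m k (by omega) hkb
    · exact hks
  have hchain := pvChain_spec p fail (some c) t j0 j0 (le_refl _) hj0_lt hj0_sfx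
    (fun j' hj' => hfail j' (by omega))
  set r := pvChain p fail (some c) j0 j0 with hrdef
  obtain ⟨hr_le, hr_sfx, hr_exit, hr_max⟩ := hchain
  have hstep : pvStep p fail m s c = if p[r]? = some c then r + 1 else 0 := by
    simp only [pvStep, hj0def, hrdef]
  rw [hstep]
  have hlen : (t ++ [c]).length = t.length + 1 := by simp
  symm
  rw [pvNSP, Nat.findGreatest_eq_iff]
  by_cases hrc : p[r]? = some c
  · have hr_lt : r < m := by
      have := List.getElem?_eq_some_iff.mp hrc
      omega
    simp only [hrc, if_true]
    refine ⟨?_, ?_, ?_⟩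
    · have : r ≤ t.length := pv_sfx_len p t r (by omega) hr_sfx
      simp [hlen]; omega
    · intro _
      exact (pv_take_ext p t c r hr_lt).mpr ⟨hr_sfx, hrc⟩
    · intro nn hnn hnn2 hnnsfx
      match nn, hnn with
      | k + 1, hnn =>
        have hk_lt : k < m := by simp [hlen] at hnn2; omega
        have hext := (pv_take_ext p t c k hk_lt).mp hnnsfx
        have : k ≤ j0 := hj0_max k hk_lt hext.1
        have : k ≤ r := hr_max k this hext.1 hext.2
        omega
  · have hr0 : r = 0 := hr_exit.resolve_right hrc
    simp only [hrc, if_false]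
    refine ⟨Nat.zero_le _, by intro h; exact absurd rfl h, ?_⟩
    intro nn hnn hnn2 hnnsfx
    match nn, hnn with
    | k + 1, _ =>
      have hk_lt : k < m := by simp [hlen] at hnn2; omega
      have hext := (pv_take_ext p t c k hk_lt).mp hnnsfx
      have hkj0 : k ≤ j0 := hj0_max k hk_lt hext.1
      have hkr : k ≤ r := hr_max k hkj0 hext.1 hext.2
      rw [hr0] at hkr
      have hk0 : k = 0 := by omega
      rw [hk0] at hext
      rw [hr0] at hrc
      exact hrc hext.2

theorem pvFailAux_length (p : List Char) : ∀ i, (pvFailAux p i).length = i := by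
  intro i
  induction i with
  | zero => simp [pvFailAux]
  | succ i ih =>
    simp only [pvFailAux]
    split <;> simp [ih]

theorem pvFailAux_spec (p : List Char) : ∀ i, i ≤ p.length → pvFailSpec p (pvFailAux p i) i := by
  intro i
  induction i with
  | zero => intro _ j hj; omega
  | succ i ih =>
    intro hi
    have ihs := ih (by omega)
    have hlen := pvFailAux_length p i
    have hpref : ∀ x j, j < i → ((pvFailAux p i) ++ [x]).getD j 0 = pvFB p (j + 1) := by
      intro x j hj
      rw [List.getD, List.getElem?_append_left (by omega)]
      exact ihs j hj
    have hnewD : ∀ x, ((pvFailAux p i) ++ [x]).getD i 0 = x := by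
      intro x
      rw [List.getD, List.getElem?_append_right (by omega)]
      simp [hlen]
    intro j hj
    by_cases hji : j < i
    · -- old entries are preserved
      simp only [pvFailAux]
      split
      · omega
      · exact hpref _ j hji
    · have hje : j = i := by omega
      rw [hje]
      simp only [pvFailAux]
      split
      · rename_i hi0
        rw [hnewD, hi0]
        simp [pvFB]
      · rename_i hi0
        have hi1 : 1 ≤ i := by omega
        rw [hnewD]
        -- the appended entry equals pvFB p (i+1)
        have hgd : (pvFailAux p i).getD (i - 1) 0 = pvFB p i := by
          have := ihs (i - 1) (by omega)
          rwa [Nat.sub_add_cancel hi1] at this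
        have hilt : i < p.length := by omega
        have hfb_le : pvFB p i ≤ i - 1 := pvFB_le p i
        have hchain := pvChain_spec p (pvFailAux p i) p[i]? (p.take i)
          ((pvFailAux p i).getD (i - 1) 0) ((pvFailAux p i).getD (i - 1) 0)
          (le_refl _) (by rw [hgd]; omega)
          (by rw [hgd]; exact pvFB_sfx p i)
          (by intro j' hj'; rw [hgd] at hj'; exact ihs j' (by omega))
        set r := pvChain p (pvFailAux p i) p[i]? ((pvFailAux p i).getD (i - 1) 0)
          ((pvFailAux p i).getD (i - 1) 0) with hrdef
        obtain ⟨hr_le, hr_sfx, hr_exit, hr_max⟩ := hchain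
        have hr_lt : r < p.length := by rw [hgd] at hr_le; omega
        have hpi : p[i]? = some p[i] := List.getElem?_eq_getElem hilt
        have htake : p.take (i + 1) = p.take i ++ [p[i]] := by
          rw [List.take_add_one, hpi]; simp
        symm
        rw [pvFB, Nat.findGreatest_eq_iff]
        by_cases hrc : p[r]? = p[i]?
        · simp only [hrc, if_true]
          refine ⟨?_, ?_, ?_⟩
          · rw [hgd] at hr_le; omega
          · intro _
            rw [htake]
            exact (pv_take_ext p (p.take i) p[i] r hr_lt).mpr ⟨hr_sfx, by rw [hrc, hpi]⟩
          · intro nn hnn hnn2 hnnsfx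
            match nn, hnn with
            | k + 1, hnn =>
              rw [htake] at hnnsfx
              have hk_lt : k < p.length := by omega
              have hext := (pv_take_ext p (p.take i) p[i] k hk_lt).mp hnnsfx
              have hkb : k ≤ pvFB p i :=
                pvFB_max p i k (by omega)
                  (pv_border p (p.take i) k i (by omega) (by omega) hext.1 (by simp))
              have : k ≤ r := hr_max k (by rw [hgd]; omega) hext.1 (by rw [hpi]; exact hext.2)
              omega
        · have hr0 : r = 0 := hr_exit.resolve_right hrc
          simp only [hrc, if_false]
          refine ⟨Nat.zero_le _, by intro h; exact absurd rfl h, ?_⟩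
          intro nn hnn hnn2 hnnsfx
          match nn, hnn with
          | k + 1, _ =>
            rw [htake] at hnnsfx
            have hk_lt : k < p.length := by omega
            have hext := (pv_take_ext p (p.take i) p[i] k hk_lt).mp hnnsfx
            have hkb : k ≤ pvFB p i :=
              pvFB_max p i k (by omega)
                (pv_border p (p.take i) k i (by omega) (by omega) hext.1 (by simp))
            have hkr : k ≤ r := hr_max k (by rw [hgd]; omega) hext.1 (by rw [hpi]; exact hext.2)
            have hk0 : k = 0 := by omega
            rw [hr0] at hrc
            rw [hk0] at hext
            exact hrc (by rw [hext.2, hpi])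

theorem pvRun_eq (p : List Char) (fail : List Nat) (hp : p ≠ [])
    (hfail : pvFailSpec p fail p.length) :
    ∀ (l t : List Char), l.foldl (pvStep p fail p.length) (pvNSP p t) = pvNSP p (t ++ l) := by
  intro l
  induction l with
  | nil => intro t; simp
  | cons c l ih =>
    intro t
    simp only [List.foldl_cons]
    rw [pvStep_eq p fail hp hfail t c, ih (t ++ [c])]
    simp

theorem pvNSP_nil (p : List Char) : pvNSP p [] = 0 := by
  simp [pvNSP]

theorem pvALoop_eq (P stop : List Char) : ∀ (m' : Nat),
    pvALoop P (P.length : Int) stop (PySem.List.pyRange (m' : Int) 0 (-1))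
      = (P.length : Int) - (Nat.findGreatest (fun k => stop.take k <:+ P) m' : Int) := by
  intro m'
  induction m' with
  | zero =>
    rw [show ((0 : Nat) : Int) = 0 from rfl, PySem.List.pyRange_of_neg 0 0 (s := -1) (by norm_num)]
    simp [pvALoop]
  | succ m' ih =>
    rw [show ((m' + 1 : Nat) : Int) = (m' : Int) + 1 by push_cast; ring]
    rw [PySem.List.pyRange_neg_one_cons (by omega)]
    rw [show (m' : Int) + 1 - 1 = (m' : Int) by ring]
    simp only [pvALoop]
    rw [PySem.List.slice_to stop (by omega)]
    rw [show ((m' : Int) + 1).toNat = m' + 1 by omega]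
    rw [Nat.findGreatest_succ]
    by_cases hp : stop.take (m' + 1) <:+ P
    · rw [if_pos ((PySem.Chars.endswith_iff P (stop.take (m' + 1))).mpr hp), if_pos hp]
      push_cast; ring
    · rw [if_neg (by rw [PySem.Chars.endswith_iff]; exact hp), if_neg hp, ih]

-- the two regex-holdback computations agree (tail length vs. n - (nl+1))
theorem pvRegex_eq (P : List Char) (nl budget : Int) (hb : 0 < budget) :
    (if 0 ≤ nl then
      (if PySem.Chars.isIn ['\n'] (PySem.List.slice P (some (nl + 1)) none) = false ∧
          (((PySem.List.slice P (some (nl + 1)) none).length : Int)) ≤ budget then nl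
       else (P.length : Int))
     else (P.length : Int))
    = (if 0 ≤ nl ∧ PySem.Chars.isIn ['\n'] (PySem.List.slice P (some (nl + 1)) none) = false ∧
          (P.length : Int) - (nl + 1) ≤ budget then nl
       else (P.length : Int)) := by
  by_cases h0 : 0 ≤ nl
  · rw [if_pos h0]
    have hlen : ((PySem.List.slice P (some (nl + 1)) none).length : Int) ≤ budget ↔
        (P.length : Int) - (nl + 1) ≤ budget := by
      rw [PySem.List.slice_some_none]
      have hcl : PySem.List.clampIdx P.length (nl + 1) ≤ P.length := PySem.List.clampIdx_le _ _
      have hcv : (PySem.List.clampIdx P.length (nl + 1) : Int)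
          = min (nl + 1) (P.length : Int) := by
        simp only [PySem.List.clampIdx]
        rw [if_neg (by omega)]
        omega
      rw [List.length_drop]
      constructor <;> intro h <;> omega
    by_cases hin : PySem.Chars.isIn ['\n'] (PySem.List.slice P (some (nl + 1)) none) = false
    · by_cases hb2 : (P.length : Int) - (nl + 1) ≤ budget
      · rw [if_pos ⟨hin, hlen.mpr hb2⟩, if_pos ⟨h0, hin, hb2⟩]
      · rw [if_neg (by rw [hlen]; tauto), if_neg (by tauto)]
    · rw [if_neg (by tauto), if_neg (by tauto)]
  · rw [if_neg h0, if_neg (by tauto)]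

-- ===== VERDICT (by name: the statement is the Claim_ definition above) =====
theorem safe_flush_point_spec : Claim_equal_safe_flush_point := by
  intro produced current_prompt last_nl_hint _
  unfold Spec_safe_flush_point safe_flush_point safe_flush_point_alt
  simp only []
  set P := produced.toList
  set n : Int := (P.length : Int) with hn
  set budget : Int := max 200 (2 * (current_prompt.toList.length : Int)) with hbudget
  set nl : Int := if 0 ≤ last_nl_hint then last_nl_hint else PySem.Chars.rfind P ['\n'] with hnl
  have hb : 0 < budget := by rw [hbudget]; omega
  set r := PySem.Chars.rstrip current_prompt.toList with hr
  set stop := if r = [] then current_prompt.toList else r with hstop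
  congr 1
  · exact pvRegex_eq P nl budget hb
  · -- exact-holdback parts agree
    by_cases hm : stop.length = 0
    · have hstopnil : stop = [] := List.length_eq_zero_iff.mp hm
      rw [hstopnil]
      simp only [List.length_nil, Nat.cast_zero, hm, if_true]
      rw [show min (0 : Int) n = 0 by rw [hn]; omega]
      rw [PySem.List.pyRange_of_neg 0 0 (s := -1) (by norm_num)]
      simp [pvALoop]
    · rw [if_neg hm]
      have hstopne : stop ≠ [] := by
        intro h; rw [h] at hm; simp at hm
      have hfail := pvFailAux_spec stop stop.length (le_refl _)
      have hrun := pvRun_eq stop (pvFailAux stop stop.length) hstopne hfail P []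
      rw [pvNSP_nil] at hrun
      simp only [List.nil_append] at hrun
      rw [hrun]
      have hmin : min ((stop.length : Nat) : Int) n = ((min stop.length P.length : Nat) : Int) := by
        rw [hn]; omega
      rw [hmin, pvALoop_eq P stop (min stop.length P.length)]
      rfl
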